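-- pv_equiv track=rewrite | github.com/OlaYK/bizhandle | ibos-backend/app/services/developer_service.py | has_scope
-- ===== SOURCE A (Python) =====
-- def has_scope(scopes: list[str] | tuple[str, ...], required_scope: str) -> bool:
--     if "*" in scopes:
--         return True
--     if required_scope in scopes:
--         return True
--     for scope in scopes:
--         if scope.endswith(":*"):
--             prefix = scope[:-1]
--             if required_scope.startswith(prefix):
--                 return True
--     return False
-- ===== SOURCE B (Python) =====
-- def has_scope(scopes, required_scope):
--     # Build the set of scope strings that would grant required_scope,
--     # then check whether it intersects the given scopes.
--     grants = {"*", required_scope}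
--     for i, ch in enumerate(required_scope):
--         if ch == ':':
--             grants.add(required_scope[:i + 1] + "*")
--     return not grants.isdisjoint(scopes)
-- ===== Notes on version B (the rewrite author's own statement) =====
-- stated objective: alternative
-- what changed: Instead of scanning scopes and string-testing each entry, B derives from required_scope the finite set of granting scope strings ('*', the exact scope, and one colon-prefix wildcard per ':' in it) and returns whether that set intersects scopes.
import Mathlib
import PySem

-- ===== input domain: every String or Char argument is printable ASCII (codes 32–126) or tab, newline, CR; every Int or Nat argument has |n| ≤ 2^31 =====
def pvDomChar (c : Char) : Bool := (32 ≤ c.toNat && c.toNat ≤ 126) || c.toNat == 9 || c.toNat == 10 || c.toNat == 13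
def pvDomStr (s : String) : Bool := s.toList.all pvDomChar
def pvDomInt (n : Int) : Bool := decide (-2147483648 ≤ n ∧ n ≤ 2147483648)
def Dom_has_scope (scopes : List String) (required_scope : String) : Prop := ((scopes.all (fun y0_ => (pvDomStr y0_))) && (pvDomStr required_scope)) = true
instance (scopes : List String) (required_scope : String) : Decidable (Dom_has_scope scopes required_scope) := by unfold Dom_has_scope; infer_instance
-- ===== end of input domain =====

-- B derives from required_scope the finite set of scope strings that would grant it
-- (exact, "*", and each colon-prefix wildcard) and intersects it with scopes (simpler: no per-scope string tests).


-- ===== PORT A =====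
def has_scope_loop (scopes : List String) (required_scope : String) : Bool :=
  match scopes with
  | [] => false
  | scope :: rest =>
    if PySem.Str.endswith scope ":*" then
      let pfx := PySem.Str.slice scope none (some (-1))
      if PySem.Str.startswith required_scope pfx then true
      else has_scope_loop rest required_scope
    else has_scope_loop rest required_scope

def has_scope (scopes : List String) (required_scope : String) : Bool :=
  if scopes.contains "*" then true
  else if scopes.contains required_scope then true
  else has_scope_loop scopes required_scope

-- ===== PORT B =====
-- required_scope[:i+1] (i ≥ 0) is PySem.Chars.slice; '+ "*"' on strings is exact list append via String.ofList.
def has_scope_alt (scopes : List String) (required_scope : String) : Bool :=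
  let grants : PySem.Set String :=
    (PySem.List.enumerate required_scope.toList).foldl
      (fun g p =>
        if p.2 = ':' then
          PySem.Set.add g
            (String.ofList (PySem.Chars.slice required_scope.toList none (some (p.1 + 1)) ++ ['*']))
        else g)
      (PySem.Set.ofList ["*", required_scope])
  !(PySem.Set.isdisjoint grants scopes)

-- ===== PRECONDITION & SPEC =====
def Spec_has_scope (scopes : List String) (required_scope : String) (out : Bool) : Prop := out = has_scope_alt scopes required_scope
instance (scopes : List String) (required_scope : String) (out : Bool) : Decidable (Spec_has_scope scopes required_scope out) := by unfold Spec_has_scope; infer_instance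

-- ===== CLAIM (what is proved, stated in full; the proofs are below) =====
def Claim_equal_has_scope : Prop := ∀ (scopes : List String) (required_scope : String), Dom_has_scope scopes required_scope → Spec_has_scope scopes required_scope (has_scope scopes required_scope)

-- ===== LEMMAS AND PROOFS =====

-- A's wildcard loop is an 'any' over scopes.
theorem loop_eq (scopes : List String) (required_scope : String) :
    has_scope_loop scopes required_scope =
      scopes.any (fun scope =>
        PySem.Str.endswith scope ":*" &&
          PySem.Str.startswith required_scope (PySem.Str.slice scope none (some (-1)))) := by
  induction scopes with
  | nil => rfl
  | cons s rest ih =>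
    rcases hE : PySem.Str.endswith s ":*" <;>
      rcases hS : PySem.Str.startswith required_scope (PySem.Str.slice s none (some (-1))) <;>
      simp only [has_scope_loop, List.any_cons, hE, hS, Bool.false_eq_true, Bool.true_and,
        Bool.false_and, Bool.true_or, Bool.false_or, if_true, if_false, ih]

-- membership in B's folded-up set
theorem mem_fold_add (rs : String) (l : List (Int × Char)) (g : PySem.Set String) (s : String) :
    (s ∈ l.foldl
      (fun g p =>
        if p.2 = ':' then
          PySem.Set.add g
            (String.ofList (PySem.Chars.slice rs.toList none (some (p.1 + 1)) ++ ['*']))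
        else g) g) ↔
      s ∈ g ∨ ∃ p ∈ l, p.2 = ':' ∧
        s = String.ofList (PySem.Chars.slice rs.toList none (some (p.1 + 1)) ++ ['*']) := by
  induction l generalizing g with
  | nil => simp
  | cons p t ih =>
    by_cases hp : p.2 = ':'
    · simp only [List.foldl_cons, hp, if_true, ih, PySem.Set.mem_add, List.mem_cons]
      constructor
      · rintro (⟨h | h⟩ | h)
        · exact Or.inl h
        · exact Or.inr ⟨p, Or.inl rfl, hp, h⟩
        · obtain ⟨q, hq, h1, h2⟩ := h; exact Or.inr ⟨q, Or.inr hq, h1, h2⟩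
      · rintro (h | ⟨q, (rfl | hq), h1, h2⟩)
        · exact Or.inl (Or.inl h)
        · exact Or.inl (Or.inr h2)
        · exact Or.inr ⟨q, hq, h1, h2⟩
    · simp only [List.foldl_cons, hp, if_false, ih, List.mem_cons]
      constructor
      · rintro (h | ⟨q, hq, h1, h2⟩)
        · exact Or.inl h
        · exact Or.inr ⟨q, Or.inr hq, h1, h2⟩
      · rintro (h | ⟨q, (rfl | hq), h1, h2⟩)
        · exact Or.inl h
        · exact absurd h1 hp
        · exact Or.inr ⟨q, hq, h1, h2⟩

-- the wildcard characterisation, on char lists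
def Wild (rs s : String) : Prop :=
  ∃ k : Nat, k < rs.toList.length ∧ rs.toList[k]? = some ':' ∧
    s.toList = rs.toList.take (k+1) ++ ['*']

theorem wild_iff (cs ss : List Char) :
    (∃ k : Nat, k < cs.length ∧ cs[k]? = some ':' ∧ ss = cs.take (k+1) ++ ['*']) ↔
      ([':', '*'] <:+ ss ∧ ss.dropLast <+: cs) := by
  constructor
  · rintro ⟨k, hk, hget, rfl⟩
    have htake : cs.take (k+1) = cs.take k ++ [':'] := by
      rw [List.take_add_one, hget]; rfl
    constructor
    · exact ⟨cs.take k, by rw [htake]; simp⟩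
    · rw [List.dropLast_concat]; exact List.take_prefix _ _
  · rintro ⟨⟨t, rfl⟩, hpre⟩
    have hdl : (t ++ [':', '*']).dropLast = t ++ [':'] := by
      have : t ++ [':', '*'] = (t ++ [':']) ++ ['*'] := by simp
      rw [this, List.dropLast_concat]
    rw [hdl] at hpre
    obtain ⟨u, hu⟩ := hpre
    refine ⟨t.length, ?_, ?_, ?_⟩
    · have := congrArg List.length hu; simp at this; omega
    · rw [← hu]
      rw [List.getElem?_append_left (by simp)]
      simp
    · have : cs.take (t.length + 1) = t ++ [':'] := by
        rw [← hu]
        have : t.length + 1 = (t ++ [':']).length := by simp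
        rw [this, List.take_left]
      rw [this]; simp

-- A's per-scope wildcard test is Wild
theorem wildA (rs s : String) :
    (PySem.Str.endswith s ":*" &&
      PySem.Str.startswith rs (PySem.Str.slice s none (some (-1)))) = true ↔ Wild rs s := by
  have hslice : (PySem.Str.slice s none (some (-1))).toList = s.toList.dropLast := by
    simp [PySem.Str.slice, PySem.List.slice_to_neg_one]
  rw [Bool.and_eq_true, PySem.Str.endswith_eq, show (":*").toList = [':', '*'] from rfl,
    PySem.Chars.endswith_iff, PySem.Str.startswith_eq, PySem.Chars.startswith_iff, hslice]
  exact (wild_iff rs.toList s.toList).symm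

-- B's enumerate-plus-slice built entry is Wild
theorem wildB (rs s : String) :
    (∃ p ∈ PySem.List.enumerate rs.toList, p.2 = ':' ∧
        s = String.ofList (PySem.Chars.slice rs.toList none (some (p.1 + 1)) ++ ['*'])) ↔
      Wild rs s := by
  have hsl : ∀ k : Nat, PySem.List.slice rs.toList none (some ((k : Int) + 1)) =
      rs.toList.take (k + 1) := by
    intro k
    have h : ((k : Int) + 1) = ((k + 1 : Nat) : Int) := by push_cast; ring
    rw [h, PySem.List.slice_to_natCast]
  constructor
  · rintro ⟨p, hp, hcol, rfl⟩
    rw [PySem.List.mem_enumerate_iff] at hp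
    obtain ⟨k, hk, rfl⟩ := hp
    simp only at hcol
    refine ⟨k, hk, by simp [List.getElem?_eq_getElem hk, hcol], ?_⟩
    simp [hsl k]
  · rintro ⟨k, hk, hget, hss⟩
    rw [List.getElem?_eq_getElem hk, Option.some_inj] at hget
    refine ⟨((0 : Int) + k, rs.toList[k]), ?_, hget, ?_⟩
    · rw [PySem.List.mem_enumerate_iff]; exact ⟨k, hk, rfl⟩
    · refine (String.ofList_eq.mpr ?_).symm
      simp [hsl k, hss]

theorem has_scope_spec' (scopes : List String) (required_scope : String) :
    has_scope scopes required_scope = has_scope_alt scopes required_scope := by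
  rw [Bool.eq_iff_iff]
  unfold has_scope has_scope_alt
  rw [loop_eq]
  simp only [Bool.not_eq_true', ← Bool.not_eq_true, PySem.Set.isdisjoint_iff,
    mem_fold_add, PySem.Set.mem_ofList, not_forall]
  push Not
  constructor
  · intro hA
    split_ifs at hA with h1 h2
    · exact ⟨"*", Or.inl (by simp), by simpa using h1⟩
    · exact ⟨required_scope, Or.inl (by simp), by simpa using h2⟩
    · simp only [List.any_eq_true] at hA
      obtain ⟨s, hs, hw⟩ := hA
      exact ⟨s, Or.inr ((wildB required_scope s).mpr ((wildA required_scope s).mp hw)), by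
        simpa using hs⟩
  · rintro ⟨s, hmem, hsc⟩
    split_ifs with h1 h2
    · trivial
    · trivial
    · rcases hmem with hinit | hwild
      · rcases (by simpa using hinit : s = "*" ∨ s = required_scope) with rfl | rfl
        · exact absurd (by simpa using hsc) h1
        · exact absurd (by simpa using hsc) h2
      · simp only [List.any_eq_true]
        exact ⟨s, by simpa using hsc, (wildA required_scope s).mpr ((wildB required_scope s).mp hwild)⟩

-- ===== VERDICT (by name: the statement is the Claim_ definition above) =====
theorem has_scope_spec : Claim_equal_has_scope := by
  intro scopes required_scope _
  exact has_scope_spec' scopes required_scope
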